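-- pv_equiv track=rewrite | github.com/t-tsekov/codefights-solutions | interview/ballsRearranging.py | ballsRearranging
-- ===== SOURCE A (Python) =====
-- def ballsRearranging(balls):
--     balls.sort()
--     best = 0
--     i = 0
--     for j in range(len(balls)):
--         while balls[i] <= balls[j] - len(balls):
--             i += 1
--         best = max(best, j - i + 1)
--     return len(balls) - best
-- ===== SOURCE B (Python) =====
-- def ballsRearranging(balls):
--     # Same in-place sort as A (mutation preserved); then an independent
--     # binary search per element instead of A's advancing two-pointer.
--     balls.sort()
--     n = len(balls)
--     best = 0
--     for j in range(n):
--         target = balls[j] - n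
--         lo, hi = 0, n
--         while lo < hi:
--             mid = (lo + hi) // 2
--             if balls[mid] <= target:
--                 lo = mid + 1
--             else:
--                 hi = mid
--         if j - lo + 1 > best:
--             best = j - lo + 1
--     return n - best
-- ===== Notes on version B (the rewrite author's own statement) =====
-- stated objective: alternative
-- what changed: Replaces the advancing two-pointer window scan with an independent hand-written binary search (bisect_right) per element over the sorted list, a different traversal that recomputes the window start from scratch each step.
import Mathlib
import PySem

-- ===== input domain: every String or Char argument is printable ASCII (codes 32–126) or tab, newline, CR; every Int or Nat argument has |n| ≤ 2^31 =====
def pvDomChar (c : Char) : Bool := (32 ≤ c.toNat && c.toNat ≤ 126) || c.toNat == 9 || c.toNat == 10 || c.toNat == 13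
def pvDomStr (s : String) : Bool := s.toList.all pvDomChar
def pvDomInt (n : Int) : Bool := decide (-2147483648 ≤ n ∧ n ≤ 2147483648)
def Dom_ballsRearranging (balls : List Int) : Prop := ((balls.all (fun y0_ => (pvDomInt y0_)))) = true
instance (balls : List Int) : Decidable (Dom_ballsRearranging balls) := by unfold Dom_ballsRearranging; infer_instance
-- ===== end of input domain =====

-- B replaces A's advancing two-pointer scan with an independent binary search per element
-- (objective: alternative decomposition, same cost). Both Pythons sort `balls` in place;
-- the equivalence proved here is about the return value (B performs the same mutation).

-- ===== PORT A =====
-- inner `while balls[i] <= balls[j] - len(balls): i += 1`; the `none` branch would be an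
-- IndexError in Python — unreachable, since the loop keeps i ≤ j < len(balls)
def pvAdvA (s : List Int) (t : Int) (i : Nat) : Nat :=
  match h : s[i]? with
  | some v => if v ≤ t then pvAdvA s t (i + 1) else i
  | none => i
termination_by s.length - i
decreasing_by
  obtain ⟨hlt, -⟩ := List.getElem?_eq_some_iff.mp h
  omega

-- one iteration of A's `for j in range(len(balls))` body
def pvStepA (s : List Int) (st : Int × Nat) (j : Nat) : Int × Nat :=
  let i := pvAdvA s (s[j]?.getD 0 - (s.length : Int)) st.2
  (max st.1 ((j : Int) - (i : Int) + 1), i)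

def ballsRearranging (balls : List Int) : Int :=
  let s := PySem.List.sorted balls (fun x => x)
  let n := s.length
  let r := (List.range n).foldl (pvStepA s) ((0 : Int), (0 : Nat))
  (n : Int) - r.1

-- ===== PORT B =====
-- hand-written bisect_right: `while lo < hi: mid = (lo+hi)//2; …`
def pvBis (s : List Int) (t : Int) (lo hi : Nat) : Nat :=
  if lo < hi then
    let mid := (lo + hi) / 2
    if s[mid]?.getD 0 ≤ t then pvBis s t (mid + 1) hi else pvBis s t lo mid
  else lo
termination_by hi - lo

-- one iteration of B's loop body: bisect, then update best
def pvStepB (s : List Int) (best : Int) (j : Nat) : Int :=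
  let lo := pvBis s (s[j]?.getD 0 - (s.length : Int)) 0 s.length
  if (j : Int) - (lo : Int) + 1 > best then (j : Int) - (lo : Int) + 1 else best

def ballsRearranging_alt (balls : List Int) : Int :=
  let s := PySem.List.sorted balls (fun x => x)
  let n := s.length
  let best := (List.range n).foldl (pvStepB s) (0 : Int)
  (n : Int) - best

-- ===== PRECONDITION & SPEC =====
def Spec_ballsRearranging (balls : List Int) (out : Int) : Prop := out = ballsRearranging_alt balls
instance (balls : List Int) (out : Int) : Decidable (Spec_ballsRearranging balls out) := by unfold Spec_ballsRearranging; infer_instance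

-- ===== CLAIM (what is proved, stated in full; the proofs are below) =====
def Claim_equal_ballsRearranging : Prop := ∀ (balls : List Int), Dom_ballsRearranging balls → Spec_ballsRearranging balls (ballsRearranging balls)

-- ===== LEMMAS AND PROOFS =====

-- `m` is the bisect_right position of `t` in `s`: all entries before it are ≤ t, the entry at it (if any) is > t
def pvGood (s : List Int) (t : Int) (m : Nat) : Prop :=
  m ≤ s.length ∧ (∀ k, k < m → (hk : k < s.length) → s[k] ≤ t) ∧ (∀ hm : m < s.length, t < s[m])

lemma pvGood_unique {s : List Int} {t : Int} {m₁ m₂ : Nat}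
    (h₁ : pvGood s t m₁) (h₂ : pvGood s t m₂) : m₁ = m₂ := by
  by_contra hne
  rcases Nat.lt_or_ge m₁ m₂ with h | h
  · have hlt : m₁ < s.length := lt_of_lt_of_le h h₂.1
    have := h₂.2.1 m₁ h hlt
    have := h₁.2.2 hlt
    omega
  · have h' : m₂ < m₁ := by omega
    have hlt : m₂ < s.length := lt_of_lt_of_le h' h₁.1
    have := h₁.2.1 m₂ h' hlt
    have := h₂.2.2 hlt
    omega

lemma pvAdvA_good (s : List Int) (t : Int) (i : Nat) :
    i ≤ s.length → (∀ k, k < i → (hk : k < s.length) → s[k] ≤ t) →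
    pvGood s t (pvAdvA s t i) := by
  fun_induction pvAdvA s t i with
  | case1 i v h hvt ih =>
    intro hi hpre
    obtain ⟨hlt, hv⟩ := List.getElem?_eq_some_iff.mp h
    apply ih (by omega)
    intro k hk hk'
    rcases Nat.lt_or_ge k i with hki | hki
    · exact hpre k hki hk'
    · have : k = i := by omega
      subst this
      simpa [hv] using hvt
  | case2 i v h hvt =>
    intro hi hpre
    obtain ⟨hlt, hv⟩ := List.getElem?_eq_some_iff.mp h
    exact ⟨Nat.le_of_lt hlt, hpre, fun hm => by simp [hv] at hvt ⊢; omega⟩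
  | case3 i h =>
    intro hi hpre
    have hge : s.length ≤ i := List.getElem?_eq_none_iff.mp h
    have : i = s.length := by omega
    subst this
    exact ⟨le_refl _, hpre, fun hm => absurd hm (by omega)⟩

lemma pvBis_good (bs : List Int) (t : Int) (lo hi : Nat) :
    lo ≤ hi → hi ≤ (PySem.List.sorted bs (fun x => x)).length →
    (∀ k, k < lo → (hk : k < (PySem.List.sorted bs (fun x => x)).length) →
        (PySem.List.sorted bs (fun x => x))[k] ≤ t) →
    (∀ k, hi ≤ k → (hk : k < (PySem.List.sorted bs (fun x => x)).length) →
        t < (PySem.List.sorted bs (fun x => x))[k]) →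
    pvGood (PySem.List.sorted bs (fun x => x)) t (pvBis (PySem.List.sorted bs (fun x => x)) t lo hi) := by
  fun_induction pvBis (PySem.List.sorted bs (fun x => x)) t lo hi with
  | case1 lo hi hlohi mid hmt ih =>
    intro hle hhi hpre hsuf
    have hmidhi : mid < hi := by omega
    have hmidlen : mid < (PySem.List.sorted bs (fun x => x)).length := by omega
    rw [List.getElem?_eq_getElem hmidlen] at hmt
    simp only [Option.getD_some] at hmt
    apply ih (by omega) hhi
    · intro k hk hk'
      rcases Nat.lt_or_ge k lo with hklo | hklo
      · exact hpre k hklo hk'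
      · have hkm : k ≤ mid := by omega
        exact le_trans (PySem.List.sorted_id_getElem_mono bs hkm hmidlen) hmt
    · exact hsuf
  | case2 lo hi hlohi mid hmt ih =>
    intro hle hhi hpre hsuf
    have hmidhi : mid < hi := by omega
    have hmidlen : mid < (PySem.List.sorted bs (fun x => x)).length := by omega
    rw [List.getElem?_eq_getElem hmidlen] at hmt
    simp only [Option.getD_some] at hmt
    apply ih (by omega) (by omega) hpre
    intro k hk hk'
    exact lt_of_lt_of_le (by omega) (PySem.List.sorted_id_getElem_mono bs hk hk')
  | case3 lo hi hlohi =>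
    intro hle hhi hpre hsuf
    have : lo = hi := by omega
    subst this
    exact ⟨hhi, hpre, fun hm => hsuf lo (le_refl _) hm⟩

-- main invariant: at step j the two folds carry the same best, and A's pointer
-- is below every future window start
lemma pvFold_eq (bs : List Int) (j : Nat)
    (hj : j ≤ (PySem.List.sorted bs (fun x => x)).length) :
    ((List.range j).foldl (pvStepA (PySem.List.sorted bs (fun x => x))) ((0 : Int), (0 : Nat))).1
      = (List.range j).foldl (pvStepB (PySem.List.sorted bs (fun x => x))) (0 : Int)
    ∧ ((List.range j).foldl (pvStepA (PySem.List.sorted bs (fun x => x))) ((0 : Int), (0 : Nat))).2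
        ≤ (PySem.List.sorted bs (fun x => x)).length
    ∧ ∀ k, k < ((List.range j).foldl (pvStepA (PySem.List.sorted bs (fun x => x))) ((0 : Int), (0 : Nat))).2 →
        (hk : k < (PySem.List.sorted bs (fun x => x)).length) →
        ∀ m, j ≤ m → (hm : m < (PySem.List.sorted bs (fun x => x)).length) →
          (PySem.List.sorted bs (fun x => x))[k]
            ≤ (PySem.List.sorted bs (fun x => x))[m] - ((PySem.List.sorted bs (fun x => x)).length : Int) := by
  induction j with
  | zero => simp
  | succ j ih =>
    obtain ⟨ihb, ihle, ihinv⟩ := ih (by omega)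
    have hjlen : j < (PySem.List.sorted bs (fun x => x)).length := by omega
    have hjget : (PySem.List.sorted bs (fun x => x))[j]?.getD 0
        = (PySem.List.sorted bs (fun x => x))[j] := by
      rw [List.getElem?_eq_getElem hjlen]; rfl
    have hgA := pvAdvA_good (PySem.List.sorted bs (fun x => x))
      ((PySem.List.sorted bs (fun x => x))[j]?.getD 0 - ((PySem.List.sorted bs (fun x => x)).length : Int))
      _ ihle
      (by intro k hk hk'
          rw [hjget]
          exact ihinv k hk hk' j le_rfl hjlen)
    have hgB := pvBis_good bs
      ((PySem.List.sorted bs (fun x => x))[j]?.getD 0 - ((PySem.List.sorted bs (fun x => x)).length : Int))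
      0 (PySem.List.sorted bs (fun x => x)).length
      (by omega) le_rfl
      (fun k hk _ => absurd hk (by omega))
      (fun k hk hk' => absurd hk' (by omega))
    have heq := pvGood_unique hgA hgB
    rw [List.range_succ, List.foldl_append, List.foldl_append]
    simp only [List.foldl_cons, List.foldl_nil, pvStepA, pvStepB]
    refine ⟨?_, ?_, ?_⟩
    · rw [heq, ihb]
      split_ifs with hx <;> omega
    · rw [heq]
      exact hgB.1
    · intro k hk hk' m hm hm'
      rw [heq] at hk
      have h1 := hgB.2.1 k hk hk'
      rw [hjget] at h1
      have h2 := PySem.List.sorted_id_getElem_mono bs (show j ≤ m by omega) hm'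
      omega

-- ===== VERDICT (by name: the statement is the Claim_ definition above) =====
theorem ballsRearranging_spec : Claim_equal_ballsRearranging := by
  intro balls _
  unfold Spec_ballsRearranging ballsRearranging ballsRearranging_alt
  dsimp only
  have := (pvFold_eq balls (PySem.List.sorted balls (fun x => x)).length (le_refl _)).1
  omega
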